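-- pv_equiv track=rewrite | github.com/divya-sree-448/AIsales | app_streamlit.py | rank_products
-- ===== SOURCE A (Python) =====
-- def rank_products(products, sentiment: str):
--     if not isinstance(sentiment, str) or not products: return []
--     s = sentiment.strip().lower()
--     if "neg" in s:
--         soft, hard = [], []
--         for p in products:
--             pl = p.lower()
--             if any(k in pl for k in ["trial", "demo", "lite", "basic"]): soft.append(p)
--             else: hard.append(p)
--         return soft + hard if soft else products
--     return products
-- ===== SOURCE B (Python) =====
-- def rank_products(products, sentiment: str):
--     if "neg" not in sentiment.strip().lower():
--         return products
--     keywords = ("trial", "demo", "lite", "basic")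
--     return sorted(products, key=lambda p: not any(k in p.lower() for k in keywords))
-- ===== Notes on version B (the rewrite author's own statement) =====
-- stated objective: idiomatic
-- what changed: Replaces the manual two-accumulator partition loop plus the 'soft nonempty' guard with a single stable sort on the boolean key 'not soft' (soft items keep first place, order preserved within each group; when no item is soft the sort is the identity, so the guard disappears).
import Mathlib
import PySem

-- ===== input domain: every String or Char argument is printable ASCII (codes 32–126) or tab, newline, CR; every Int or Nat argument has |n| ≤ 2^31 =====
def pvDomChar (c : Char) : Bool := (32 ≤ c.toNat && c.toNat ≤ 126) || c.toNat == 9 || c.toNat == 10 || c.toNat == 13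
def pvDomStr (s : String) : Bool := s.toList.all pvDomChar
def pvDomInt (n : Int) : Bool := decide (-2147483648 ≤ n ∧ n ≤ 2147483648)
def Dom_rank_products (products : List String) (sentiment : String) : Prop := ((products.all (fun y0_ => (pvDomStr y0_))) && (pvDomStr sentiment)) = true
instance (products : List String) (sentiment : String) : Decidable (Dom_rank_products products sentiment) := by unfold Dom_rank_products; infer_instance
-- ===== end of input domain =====

-- B replaces A's manual two-list partition loop (and its 'soft nonempty' guard) with one
-- stable sort on the boolean key 'not soft'; same return value, similar cost (objective: idiomatic).


-- ===== PORT A =====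
def rank_products (products : List String) (sentiment : String) : List String :=
  -- 'not isinstance(sentiment, str)' is always false under the type convention
  if products = [] then []
  else
    let s := PySem.Str.lower (PySem.Str.strip sentiment)
    if PySem.Str.isIn "neg" s then
      let sh := products.foldl (fun (acc : List String × List String) p =>
        let pl := PySem.Str.lower p
        if ["trial", "demo", "lite", "basic"].any (fun k => PySem.Str.isIn k pl) then
          (acc.1 ++ [p], acc.2)
        else
          (acc.1, acc.2 ++ [p])) ([], [])
      if sh.1 ≠ [] then sh.1 ++ sh.2 else products
    else products

-- ===== PORT B =====
def rank_products_alt (products : List String) (sentiment : String) : List String :=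
  if PySem.Str.isIn "neg" (PySem.Str.lower (PySem.Str.strip sentiment)) = false then products
  else
    PySem.List.sorted products
      (fun p => !(["trial", "demo", "lite", "basic"].any (fun k => PySem.Str.isIn k (PySem.Str.lower p)))) false

-- ===== PRECONDITION & SPEC =====
def Spec_rank_products (products : List String) (sentiment : String) (out : List String) : Prop := out = rank_products_alt products sentiment
instance (products : List String) (sentiment : String) (out : List String) : Decidable (Spec_rank_products products sentiment out) := by unfold Spec_rank_products; infer_instance

-- ===== CLAIM (what is proved, stated in full; the proofs are below) =====
def Claim_equal_rank_products : Prop := ∀ (products : List String) (sentiment : String), Dom_rank_products products sentiment → Spec_rank_products products sentiment (rank_products products sentiment)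

-- ===== LEMMAS AND PROOFS =====

-- inserting past a prefix it never goes before
theorem insertBy_append_not_before {α : Type} (before : α → α → Bool) (x : α)
    (f0 f1 : List α) (h : ∀ y ∈ f0, before x y = false) :
    PySem.List.insertBy before x (f0 ++ f1) = f0 ++ PySem.List.insertBy before x f1 := by
  induction f0 with
  | nil => simp
  | cons y ys ih =>
      simp only [List.cons_append, PySem.List.insertBy, h y (by simp)]
      simp only [Bool.false_eq_true, if_false, List.cons.injEq, true_and]
      exact ih (fun z hz => h z (by simp [hz]))

-- insertion sort with a boolean key is the stable two-way partition
theorem foldl_insertBy_bool {α : Type} (key : α → Bool) :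
    ∀ (xs f0 f1 : List α), (∀ y ∈ f0, key y = false) → (∀ y ∈ f1, key y = true) →
    xs.foldl (fun acc x => PySem.List.insertBy (fun a b => decide (key a < key b)) x acc) (f0 ++ f1)
      = (f0 ++ xs.filter (fun x => !key x)) ++ (f1 ++ xs.filter key) := by
  intro xs
  induction xs with
  | nil => intro f0 f1 _ _; simp
  | cons x xs ih =>
      intro f0 f1 h0 h1
      simp only [List.foldl_cons]
      cases hx : key x with
      | false =>
          have hstep : PySem.List.insertBy (fun a b => decide (key a < key b)) x (f0 ++ f1)
              = (f0 ++ [x]) ++ f1 := by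
            rw [insertBy_append_not_before _ _ _ _ (by intro y hy; simp [hx, h0 y hy])]
            cases f1 with
            | nil => simp [PySem.List.insertBy]
            | cons z zs => simp [PySem.List.insertBy, hx, h1 z (by simp)]
          have h0' : ∀ y ∈ f0 ++ [x], key y = false := by
            intro y hy
            rcases List.mem_append.mp hy with h | h
            · exact h0 y h
            · simp only [List.mem_singleton] at h; rw [h]; exact hx
          rw [hstep, ih (f0 ++ [x]) f1 h0' h1]
          simp [hx]
      | true =>
          have hstep : PySem.List.insertBy (fun a b => decide (key a < key b)) x (f0 ++ f1)
              = f0 ++ (f1 ++ [x]) := by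
            rw [PySem.List.insertBy_of_forall_not_before]
            · simp
            · intro y _; simp [hx]
          have h1' : ∀ y ∈ f1 ++ [x], key y = true := by
            intro y hy
            rcases List.mem_append.mp hy with h | h
            · exact h1 y h
            · simp only [List.mem_singleton] at h; rw [h]; exact hx
          rw [hstep, ih f0 (f1 ++ [x]) h0 h1']
          simp [hx]

-- A's accumulator loop is the same pair of filters
theorem foldl_partition {α : Type} (p : α → Bool) :
    ∀ (xs s h : List α),
    xs.foldl (fun (acc : List α × List α) x =>
        if p x then (acc.1 ++ [x], acc.2) else (acc.1, acc.2 ++ [x])) (s, h)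
      = (s ++ xs.filter p, h ++ xs.filter (fun x => !p x)) := by
  intro xs
  induction xs with
  | nil => intro s h; simp
  | cons x xs ih =>
      intro s h
      simp only [List.foldl_cons]
      cases hx : p x <;> simp [hx, ih]

theorem filter_not_of_filter_eq_nil {α : Type} (p : α → Bool) (xs : List α)
    (h : xs.filter p = []) : xs.filter (fun x => !p x) = xs := by
  apply List.filter_eq_self.mpr
  intro x hx
  have := List.filter_eq_nil_iff.mp h x hx
  simp at this ⊢
  simp [this]

-- ===== VERDICT (by name: the statement is the Claim_ definition above) =====
theorem rank_products_spec : Claim_equal_rank_products := by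
  intro products sentiment _
  unfold Spec_rank_products rank_products rank_products_alt
  set soft : String → Bool :=
    fun p => ["trial", "demo", "lite", "basic"].any (fun k => PySem.Str.isIn k (PySem.Str.lower p)) with hsoft
  by_cases hneg : PySem.Str.isIn "neg" (PySem.Str.lower (PySem.Str.strip sentiment)) = true
  · by_cases hnil : products = []
    · rw [PySem.List.sorted_eq_foldl_insertBy]
      simp [hnil]
    · simp only [hnil, if_false, hneg, Bool.true_eq_false, if_true]
      rw [PySem.List.sorted_eq_foldl_insertBy]
      have hB := foldl_insertBy_bool (fun p => !soft p) products [] [] (by simp) (by simp)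
      simp only [List.nil_append, Bool.not_not] at hB
      rw [hB]
      have hA := foldl_partition soft products [] []
      simp only [List.nil_append] at hA
      rw [hA]
      by_cases hs : products.filter soft = []
      · simp only [hs, ne_eq, not_true_eq_false, if_false, List.nil_append]
        exact (filter_not_of_filter_eq_nil soft products hs).symm
      · simp [hs]
  · have hneg' : PySem.Chars.isIn ['n', 'e', 'g'] (PySem.Chars.lower (PySem.Chars.strip sentiment.toList)) = false := by
      simpa using hneg
    by_cases hnil : products = [] <;> simp [hnil, hneg']
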